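-- pv_equiv track=rewrite | github.com/hyper-77/LeetCode_practice | BinarySearch.py | BinarySearch_low_bound
-- ===== SOURCE A (Python) =====
-- def BinarySearch_low_bound(num,T): ##查找最后一个小于目标值的数
--     left=0
--     right=len(num)
--     while left<right:
--         mid=int((left+right)/2)
--         if num[mid]<T:
--             left=mid+1
--         else:
--             right=mid
--
--     return right-1
-- ===== SOURCE B (Python) =====
-- def BinarySearch_low_bound(num, T):
--     # Recursive lower-bound search over list slices: go(base, xs) returns
--     # base + (boundary index within xs); the final -1 is applied once.
--     def go(base, xs):
--         if not xs:
--             return base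
--         m = len(xs) // 2
--         if xs[m] < T:
--             return go(base + m + 1, xs[m + 1:])
--         return go(base, xs[:m])
--     return go(0, num) - 1
-- ===== Notes on version B (the rewrite author's own statement) =====
-- stated objective: alternative
-- what changed: Replaces the iterative while-loop over mutable left/right indices with a structural recursion over list slices: a helper carries (base offset, sublist), halves the sublist with take/drop instead of moving index bounds, and the final -1 is applied once at top level.
import Mathlib
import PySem

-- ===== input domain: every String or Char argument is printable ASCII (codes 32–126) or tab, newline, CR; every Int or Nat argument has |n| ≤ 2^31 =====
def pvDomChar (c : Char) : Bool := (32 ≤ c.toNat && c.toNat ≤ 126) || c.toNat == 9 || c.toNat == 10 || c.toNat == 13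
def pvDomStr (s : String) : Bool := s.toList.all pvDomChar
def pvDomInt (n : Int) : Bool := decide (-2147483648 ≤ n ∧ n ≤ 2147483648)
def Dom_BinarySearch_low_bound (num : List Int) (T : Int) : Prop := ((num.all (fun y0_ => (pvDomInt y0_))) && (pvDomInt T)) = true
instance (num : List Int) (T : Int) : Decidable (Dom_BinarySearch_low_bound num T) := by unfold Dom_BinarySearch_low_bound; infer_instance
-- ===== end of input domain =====

-- B replaces A's index-based while-loop by a structural recursion over list slices (take/drop with a base offset); same result, alternative decomposition.

-- ===== PORT A =====
-- A's while-loop over mutable (left, right); indices are nonnegative throughout, so Nat state.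
-- num[mid] is always in range (mid < right ≤ len num), ported via pyGet? with a default that is never used.
def pvLoopA (num : List Int) (T : Int) (left right : Nat) : Nat :=
  if _h : left < right then
    let mid := (left + right) / 2
    if (PySem.List.pyGet? num (Int.ofNat mid)).getD 0 < T then
      pvLoopA num T (mid + 1) right
    else
      pvLoopA num T left mid
  else right
termination_by right - left
decreasing_by all_goals omega

def BinarySearch_low_bound (num : List Int) (T : Int) : Int :=
  (pvLoopA num T 0 num.length : Int) - 1

-- ===== PORT B =====
-- go(base, xs): recursion on the sublist xs; xs[m] with m = len(xs)//2 is always a valid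
-- nonnegative index (xs nonempty), so List.getD is exact for Python's xs[m] here.
def pvGoB (T : Int) (base : Nat) (xs : List Int) : Nat :=
  if _h : xs = [] then base
  else
    let m := xs.length / 2
    if xs.getD m 0 < T then
      pvGoB T (base + m + 1) (xs.drop (m + 1))
    else
      pvGoB T base (xs.take m)
termination_by xs.length
decreasing_by
  all_goals simp [List.length_drop, List.length_take]
  all_goals have : 0 < xs.length := List.length_pos_of_ne_nil _h
  all_goals omega

def BinarySearch_low_bound_alt (num : List Int) (T : Int) : Int :=
  (pvGoB T 0 num : Int) - 1

-- ===== PRECONDITION & SPEC =====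
def Spec_BinarySearch_low_bound (num : List Int) (T : Int) (out : Int) : Prop := out = BinarySearch_low_bound_alt num T
instance (num : List Int) (T : Int) (out : Int) : Decidable (Spec_BinarySearch_low_bound num T out) := by unfold Spec_BinarySearch_low_bound; infer_instance

-- ===== CLAIM =====
def Claim_equal_BinarySearch_low_bound : Prop := ∀ (num : List Int) (T : Int), Dom_BinarySearch_low_bound num T → Spec_BinarySearch_low_bound num T (BinarySearch_low_bound num T)

-- ===== LEMMAS AND PROOFS =====
theorem pvLoop_eq_go (num : List Int) (T : Int) :
    ∀ n lo hi, hi - lo ≤ n → lo ≤ hi → hi ≤ num.length →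
      pvLoopA num T lo hi = pvGoB T lo ((num.drop lo).take (hi - lo)) := by
  intro n
  induction n with
  | zero =>
    intro lo hi hle hlh _
    have : lo = hi := by omega
    subst this
    rw [pvLoopA, pvGoB]
    simp
  | succ n ih =>
    intro lo hi hle hlh hhi
    rw [pvLoopA, pvGoB]
    by_cases h : lo < hi
    · have hlen : ((num.drop lo).take (hi - lo)).length = hi - lo := by
        simp; omega
      have hne : ¬ (num.drop lo).take (hi - lo) = [] := by
        intro he; rw [he] at hlen; simp at hlen; omega
      simp only [h, dif_pos, hne, dif_neg, not_false_iff, hlen]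
      have hmid : (lo + hi) / 2 = lo + (hi - lo) / 2 := by omega
      have hmlt : (hi - lo) / 2 < hi - lo := by omega
      have hmidlt : (lo + hi) / 2 < num.length := by omega
      have hidx : (PySem.List.pyGet? num (Int.ofNat ((lo + hi) / 2))).getD 0
          = ((num.drop lo).take (hi - lo)).getD ((hi - lo) / 2) 0 := by
        rw [Int.ofNat_eq_natCast, PySem.List.pyGet?_natCast]
        rw [List.getD_eq_getElem _ _ (by omega : (hi - lo) / 2 < ((num.drop lo).take (hi - lo)).length)]
        rw [List.getElem_take, List.getElem_drop]
        rw [List.getElem?_eq_getElem hmidlt]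
        simp [hmid]
      rw [hidx]
      by_cases hc : ((num.drop lo).take (hi - lo)).getD ((hi - lo) / 2) 0 < T
      · simp only [hc, if_pos]
        have hdrop : ((num.drop lo).take (hi - lo)).drop ((hi - lo) / 2 + 1)
            = (num.drop ((lo + hi) / 2 + 1)).take (hi - ((lo + hi) / 2 + 1)) := by
          rw [List.drop_take, List.drop_drop,
            show hi - lo - ((hi - lo) / 2 + 1) = hi - ((lo + hi) / 2 + 1) from by omega,
            show lo + ((hi - lo) / 2 + 1) = (lo + hi) / 2 + 1 from by omega]
        rw [ih ((lo + hi) / 2 + 1) hi (by omega) (by omega) (by omega), hdrop]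
        congr 1
        omega
      · simp only [hc, if_neg, not_false_iff]
        have htake : ((num.drop lo).take (hi - lo)).take ((hi - lo) / 2)
            = (num.drop lo).take ((lo + hi) / 2 - lo) := by
          rw [List.take_take]
          congr 1
          omega
        rw [ih lo ((lo + hi) / 2) (by omega) (by omega) (by omega), htake]
    · have h0 : hi - lo = 0 := by omega
      simp only [h, dif_neg, not_false_iff, h0]
      simp
      omega

-- ===== VERDICT =====
theorem BinarySearch_low_bound_spec : Claim_equal_BinarySearch_low_bound := by
  intro num T _
  unfold Spec_BinarySearch_low_bound BinarySearch_low_bound BinarySearch_low_bound_alt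
  rw [pvLoop_eq_go num T num.length 0 num.length (by omega) (by omega) (by omega)]
  simp
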